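-- pv_equiv track=rewrite | github.com/GloriousLotus/advent_calendar | 2025/day_2/functions.py | is_invalid_id_for_slice_len
-- ===== SOURCE A (Python) =====
-- def is_invalid_id_for_slice_len(santa_id:str,slice_len:int):
--     if len(santa_id)%slice_len != 0:
--         return False
--     first_slice = santa_id[:slice_len]
--     for i in range(slice_len,len(santa_id),slice_len):
--         new_slice = santa_id[i:i+slice_len]
--         if first_slice != new_slice: #no pattern
--             return False
--     # all slices are equal to first slices -> true
--     return True
-- ===== SOURCE B (Python) =====
-- def is_invalid_id_for_slice_len(santa_id: str, slice_len: int):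
--     if len(santa_id) % slice_len != 0:
--         return False
--     first_slice = santa_id[:slice_len]
--     return first_slice * (len(santa_id) // slice_len) == santa_id
-- ===== Notes on version B (the rewrite author's own statement) =====
-- stated objective: idiomatic
-- what changed: Replaces the explicit loop comparing each equal-length slice against the first with a single build-and-compare: first_slice * (len//slice_len) == santa_id.
-- intended difference: For negative slice_len whose magnitude divides the length of a non-empty santa_id, A accidentally returns True because its range(slice_len, len, slice_len) is empty; B returns False, the intended answer since a negative slice length describes no repetition (first_slice*negative is empty). — e.g. on is_invalid_id_for_slice_len("ab", -2): A returns true, B returns false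
import Mathlib
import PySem

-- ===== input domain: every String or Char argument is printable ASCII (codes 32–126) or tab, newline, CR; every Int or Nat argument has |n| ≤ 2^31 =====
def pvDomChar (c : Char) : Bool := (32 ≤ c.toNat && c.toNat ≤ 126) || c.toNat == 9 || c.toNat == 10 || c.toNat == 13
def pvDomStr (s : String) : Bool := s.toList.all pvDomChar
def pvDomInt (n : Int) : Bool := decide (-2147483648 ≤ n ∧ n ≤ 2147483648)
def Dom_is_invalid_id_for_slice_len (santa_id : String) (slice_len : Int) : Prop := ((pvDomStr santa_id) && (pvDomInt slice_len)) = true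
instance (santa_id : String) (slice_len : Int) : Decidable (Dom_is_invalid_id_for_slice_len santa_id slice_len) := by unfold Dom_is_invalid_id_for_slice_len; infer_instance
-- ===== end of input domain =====

-- B replaces A's slice-comparison loop with a single build-and-compare
-- (first_slice repeated len//slice_len times, compared to the whole input);
-- on the corner stated at D_ below (negative slice_len dividing the length of a
-- non-empty id) B returns the intended False where A returns True.

-- ===== PORT A =====
-- the local first_slice = santa_id[:slice_len] is inlined; the for-loop with
-- early `return False` is `.all` over the same range of start indices
def is_invalid_id_for_slice_len (santa_id : String) (slice_len : Int) : Bool :=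
  if PySem.Int.mod (santa_id.toList.length : Int) slice_len ≠ 0 then false
  else
    (PySem.List.pyRange slice_len (santa_id.toList.length : Int) slice_len).all
      (fun i => PySem.List.slice santa_id.toList (some i) (some (i + slice_len))
        == PySem.List.slice santa_id.toList none (some slice_len))

-- ===== PORT B =====
-- first_slice = santa_id[:slice_len] inlined; first_slice * (len // slice_len) == santa_id
def is_invalid_id_for_slice_len_alt (santa_id : String) (slice_len : Int) : Bool :=
  if PySem.Int.mod (santa_id.toList.length : Int) slice_len ≠ 0 then false
  else
    PySem.List.pyRepeat (PySem.List.slice santa_id.toList none (some slice_len))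
        (PySem.Int.floordiv (santa_id.toList.length : Int) slice_len)
      == santa_id.toList

-- ===== PRECONDITION & SPEC =====
-- Pre_ excludes only slice_len = 0, on which Python A raises ZeroDivisionError (B raises too).
def Pre_is_invalid_id_for_slice_len (santa_id : String) (slice_len : Int) : Prop := slice_len ≠ 0
instance (santa_id : String) (slice_len : Int) : Decidable (Pre_is_invalid_id_for_slice_len santa_id slice_len) := by unfold Pre_is_invalid_id_for_slice_len; infer_instance
def pvWitness_is_invalid_id_for_slice_len : String × Int := ("abab", 2)

-- For negative slice_len whose magnitude divides the length of a non-empty santa_id,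
-- A accidentally returns True (its range(slice_len, len, slice_len) is empty); B returns
-- False, the intended answer since a negative slice length describes no repetition.
def D_is_invalid_id_for_slice_len (santa_id : String) (slice_len : Int) : Prop :=
  slice_len < 0 ∧ slice_len ∣ (santa_id.toList.length : Int) ∧ santa_id.toList ≠ []
instance (santa_id : String) (slice_len : Int) : Decidable (D_is_invalid_id_for_slice_len santa_id slice_len) := by unfold D_is_invalid_id_for_slice_len; infer_instance

def Spec_is_invalid_id_for_slice_len (santa_id : String) (slice_len : Int) (out : Bool) : Prop := ¬ D_is_invalid_id_for_slice_len santa_id slice_len → out = is_invalid_id_for_slice_len_alt santa_id slice_len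
instance (santa_id : String) (slice_len : Int) (out : Bool) : Decidable (Spec_is_invalid_id_for_slice_len santa_id slice_len out) := by unfold Spec_is_invalid_id_for_slice_len; infer_instance

def pvDiffWitness_is_invalid_id_for_slice_len : String × Int := ("ab", -2)
def pvDiffWitnessOut_is_invalid_id_for_slice_len : Bool × Bool := (true, false)

-- ===== CLAIM (what is proved, stated in full; the proofs are below) =====
def Claim_unchanged_is_invalid_id_for_slice_len : Prop := ∀ (santa_id : String) (slice_len : Int), Dom_is_invalid_id_for_slice_len santa_id slice_len → Pre_is_invalid_id_for_slice_len santa_id slice_len → Spec_is_invalid_id_for_slice_len santa_id slice_len (is_invalid_id_for_slice_len santa_id slice_len)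
def Claim_changed_is_invalid_id_for_slice_len : Prop := Dom_is_invalid_id_for_slice_len (pvDiffWitness_is_invalid_id_for_slice_len.1) (pvDiffWitness_is_invalid_id_for_slice_len.2) ∧ Pre_is_invalid_id_for_slice_len (pvDiffWitness_is_invalid_id_for_slice_len.1) (pvDiffWitness_is_invalid_id_for_slice_len.2) ∧ D_is_invalid_id_for_slice_len (pvDiffWitness_is_invalid_id_for_slice_len.1) (pvDiffWitness_is_invalid_id_for_slice_len.2) ∧ is_invalid_id_for_slice_len (pvDiffWitness_is_invalid_id_for_slice_len.1) (pvDiffWitness_is_invalid_id_for_slice_len.2) = pvDiffWitnessOut_is_invalid_id_for_slice_len.1 ∧ is_invalid_id_for_slice_len_alt (pvDiffWitness_is_invalid_id_for_slice_len.1) (pvDiffWitness_is_invalid_id_for_slice_len.2) = pvDiffWitnessOut_is_invalid_id_for_slice_len.2 ∧ pvDiffWitnessOut_is_invalid_id_for_slice_len.1 ≠ pvDiffWitnessOut_is_invalid_id_for_slice_len.2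
def Claim_exact_is_invalid_id_for_slice_len : Prop := ∀ (santa_id : String) (slice_len : Int), Dom_is_invalid_id_for_slice_len santa_id slice_len → Pre_is_invalid_id_for_slice_len santa_id slice_len → D_is_invalid_id_for_slice_len santa_id slice_len → is_invalid_id_for_slice_len santa_id slice_len ≠ is_invalid_id_for_slice_len_alt santa_id slice_len

-- ===== LEMMAS AND PROOFS =====

-- the repeated-prefix string equals l iff every K-chunk of l equals f
theorem pv_replicate_flatten_eq_iff {α : Type} (f : List α) (K : Nat)
    (hf : f.length = K) :
    ∀ (m : Nat) (l : List α), l.length = m * K →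
      ((List.replicate m f).flatten = l ↔ ∀ j < m, (l.drop (j * K)).take K = f) := by
  intro m
  induction m with
  | zero =>
      intro l hl
      simp at hl
      simp [hl]
  | succ m ih =>
      intro l hl
      rw [List.replicate_succ, List.flatten_cons]
      rw [show ((f ++ (List.replicate m f).flatten = l) ↔
            (l.take f.length = f ∧ (List.replicate m f).flatten = l.drop f.length)) from by
          constructor
          · rintro rfl; exact ⟨by simp, by simp⟩
          · rintro ⟨h1, h2⟩; rw [← List.take_append_drop f.length l, h1, ← h2], hf]
      have hdl : (l.drop K).length = m * K := by
        simp [List.length_drop, hl]; ring_nf; omega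
      rw [ih (l.drop K) hdl]
      constructor
      · rintro ⟨h0, hrest⟩ j hj
        rcases Nat.eq_zero_or_pos j with rfl | hpos
        · simpa using h0
        · obtain ⟨j', rfl⟩ := Nat.exists_eq_add_of_le hpos
          have := hrest j' (by omega)
          rw [List.drop_drop] at this
          convert this using 3
          ring
      · intro h
        refine ⟨by simpa using h 0 (by omega), fun j hj => ?_⟩
        have := h (j + 1) (by omega)
        rw [List.drop_drop]
        convert this using 3
        ring

-- empty ranges (negative step with start ≤ stop; positive step with stop ≤ start)
theorem pv_pyRange_neg_empty (a b s : Int) (hs : s < 0) (hab : a ≤ b) :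
    PySem.List.pyRange a b s = [] := by
  unfold PySem.List.pyRange
  rw [if_neg (by omega)]
  have h1 : ¬ 0 < s := by omega
  simp [h1, if_neg (not_lt.mpr hab)]

theorem pv_pyRange_pos_empty (a b s : Int) (hs : 0 < s) (hab : b ≤ a) :
    PySem.List.pyRange a b s = [] := by
  unfold PySem.List.pyRange
  rw [if_neg (by omega)]
  simp [hs, if_neg (not_lt.mpr hab)]

-- A = B for positive slice_len
theorem is_invalid_spec_pos (santa_id : String) (slice_len : Int)
    (hk : 0 < slice_len) :
    is_invalid_id_for_slice_len santa_id slice_len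
      = is_invalid_id_for_slice_len_alt santa_id slice_len := by
  unfold is_invalid_id_for_slice_len is_invalid_id_for_slice_len_alt
  by_cases hmod : PySem.Int.mod (santa_id.toList.length : Int) slice_len ≠ 0
  · rw [if_pos hmod, if_pos hmod]
  · push_neg at hmod
    rw [if_neg (not_not_intro hmod), if_neg (not_not_intro hmod)]
    set l := santa_id.toList with hl
    obtain ⟨K, rfl⟩ : ∃ K : Nat, slice_len = (K : Int) :=
      ⟨slice_len.toNat, (Int.toNat_of_nonneg (le_of_lt hk)).symm⟩
    have hK : 0 < K := by exact_mod_cast hk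
    have hdvd : ((K : Int)) ∣ (l.length : Int) :=
      (PySem.Int.mod_eq_zero_iff_dvd _ _).1 hmod
    have hKdvd : K ∣ l.length := by exact_mod_cast hdvd
    set m := l.length / K with hm
    have hlen : l.length = m * K := by
      rw [hm, Nat.div_mul_cancel hKdvd]
    have hfd : PySem.Int.floordiv (l.length : Int) (K : Int) = ((m : Nat) : Int) := by
      rw [PySem.Int.floordiv_natCast]
    have hfirst : PySem.List.slice l none (some (K : Int)) = l.take K := by
      rw [PySem.List.slice_to _ (by positivity)]; simp
    rcases Nat.eq_zero_or_pos m with hm0 | hm0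
    · -- empty string: both sides are true
      have hnil : l = [] := List.eq_nil_of_length_eq_zero (by rw [hlen, hm0, Nat.zero_mul])
      have hrep : ∀ x : Int, PySem.List.pyRepeat ([] : List Char) x = [] := by
        intro x
        exact List.flatten_eq_nil_iff.mpr (fun ys hys => List.eq_of_mem_replicate hys)
      rw [hnil, pv_pyRange_pos_empty _ _ _ hk (by simp)]
      simp [hrep]
    · have hflen : (l.take K).length = K := by
        simp only [List.length_take, hlen]
        exact min_eq_left (Nat.le_mul_of_pos_left K hm0)
      have hchar := pv_replicate_flatten_eq_iff (l.take K) K hflen m l hlen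
      rw [hfirst, hfd]
      simp only [PySem.List.pyRepeat, Int.toNat_natCast]
      rw [Bool.eq_iff_iff]
      simp only [List.all_eq_true, beq_iff_eq]
      constructor
      · intro hall
        rw [hchar]
        intro j hj
        rcases Nat.eq_zero_or_pos j with rfl | hpos
        · simp
        · have hmemr : ((j * K : Nat) : Int) ∈ PySem.List.pyRange (K : Int) (l.length : Int) (K : Int) := by
            rw [PySem.List.mem_pyRange_iff_of_pos (by exact_mod_cast hK)]
            refine ⟨by push_cast; nlinarith, by rw [hlen]; push_cast; nlinarith, ?_⟩
            exact ⟨(j : Int) - 1, by push_cast; ring⟩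
          have := hall _ hmemr
          rw [show ((j * K : Nat) : Int) + (K : Int) = ((j * K + K : Nat) : Int) by push_cast; ring,
            PySem.List.slice_natCast] at this
          simpa [Nat.add_sub_cancel_left] using this
      · intro heq i hi
        rw [hchar] at heq
        rw [PySem.List.mem_pyRange_iff_of_pos (by exact_mod_cast hK)] at hi
        obtain ⟨h1, h2, c, hc⟩ := hi
        have hi0 : 0 ≤ i := le_trans (by positivity) h1
        obtain ⟨I, rfl⟩ : ∃ I : Nat, i = (I : Nat) := ⟨i.toNat, (Int.toNat_of_nonneg hi0).symm⟩
        have hc0 : 0 ≤ c := by nlinarith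
        obtain ⟨j, rfl⟩ : ∃ j : Nat, c = (j : Nat) := ⟨c.toNat, (Int.toNat_of_nonneg hc0).symm⟩
        have hIe : I = (j + 1) * K := by
          have : (I : Int) = (((j + 1) * K : Nat) : Int) := by push_cast; linarith [hc]
          exact_mod_cast this
        have hjm : j + 1 < m := by
          have hx : I < l.length := by exact_mod_cast h2
          rw [hIe, hlen] at hx
          exact Nat.lt_of_mul_lt_mul_right hx
        have := heq (j + 1) hjm
        rw [show (I : Int) + (K : Int) = ((I + K : Nat) : Int) by push_cast; ring,
          PySem.List.slice_natCast, Nat.add_sub_cancel_left, hIe]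
        exact this

theorem is_invalid_A_true_on_D (santa_id : String) (slice_len : Int)
    (hD : D_is_invalid_id_for_slice_len santa_id slice_len) :
    is_invalid_id_for_slice_len santa_id slice_len = true := by
  obtain ⟨hneg, hdvd, hne⟩ := hD
  have hmod : PySem.Int.mod (santa_id.toList.length : Int) slice_len = 0 :=
    (PySem.Int.mod_eq_zero_iff_dvd _ _).2 hdvd
  unfold is_invalid_id_for_slice_len
  rw [if_neg (not_not_intro hmod),
    pv_pyRange_neg_empty _ _ _ hneg (le_trans (le_of_lt hneg) (by positivity))]
  rfl

theorem is_invalid_B_false_on_D (santa_id : String) (slice_len : Int)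
    (hD : D_is_invalid_id_for_slice_len santa_id slice_len) :
    is_invalid_id_for_slice_len_alt santa_id slice_len = false := by
  obtain ⟨hneg, hdvd, hne⟩ := hD
  have hmod : PySem.Int.mod (santa_id.toList.length : Int) slice_len = 0 :=
    (PySem.Int.mod_eq_zero_iff_dvd _ _).2 hdvd
  unfold is_invalid_id_for_slice_len_alt
  rw [if_neg (not_not_intro hmod)]
  have hnpos : 0 < (santa_id.toList.length : Int) := by
    have : santa_id.toList.length ≠ 0 := fun h => hne (List.eq_nil_of_length_eq_zero h)
    exact_mod_cast Nat.pos_of_ne_zero this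
  -- len // slice_len < 0, so the repetition is empty and cannot equal a non-empty list
  have hfd : PySem.Int.floordiv (santa_id.toList.length : Int) slice_len < 0 := by
    by_contra h
    push_neg at h
    have := PySem.Int.floordiv_mul_add_mod (santa_id.toList.length : Int) slice_len
    rw [hmod, add_zero] at this
    nlinarith
  simp only [PySem.List.pyRepeat, Int.toNat_of_nonpos (le_of_lt hfd), List.replicate_zero,
    List.flatten_nil, beq_eq_false_iff_ne, ne_eq]
  exact fun h => hne h.symm

-- ===== VERDICT (by name: the statement is the Claim_ definition above) =====
theorem is_invalid_id_for_slice_len_spec : Claim_unchanged_is_invalid_id_for_slice_len := by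
  intro santa_id slice_len _hDom hPre hnD
  rcases lt_trichotomy slice_len 0 with hneg | hz | hpos
  · -- negative slice_len, outside D_: the guard fails, or the string is empty
    by_cases hdvd : slice_len ∣ (santa_id.toList.length : Int)
    · have hnil : santa_id.toList = [] := by
        by_contra hne
        exact hnD ⟨hneg, hdvd, hne⟩
      have hmod : PySem.Int.mod (santa_id.toList.length : Int) slice_len = 0 :=
        (PySem.Int.mod_eq_zero_iff_dvd _ _).2 hdvd
      unfold is_invalid_id_for_slice_len is_invalid_id_for_slice_len_alt
      have hq : PySem.Int.floordiv ((List.length ([] : List Char) : Nat) : Int) slice_len = 0 := by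
        have h := PySem.Int.floordiv_mul_add_mod ((List.length ([] : List Char) : Nat) : Int) slice_len
        have hm0 : PySem.Int.mod ((List.length ([] : List Char) : Nat) : Int) slice_len = 0 := by
          simp only [List.length_nil, Nat.cast_zero]
          exact (PySem.Int.mod_eq_zero_iff_dvd _ _).2 (dvd_zero _)
        rw [hm0, add_zero] at h
        simp only [List.length_nil, Nat.cast_zero] at h ⊢
        rcases mul_eq_zero.mp h with h' | h'
        · exact h'
        · exact absurd h' hPre
      rw [if_neg (not_not_intro hmod), if_neg (not_not_intro hmod), hnil,
        pv_pyRange_neg_empty _ _ _ hneg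
          (by simp only [List.length_nil, Nat.cast_zero]; omega), hq]
      simp [PySem.List.pyRepeat]
    · have hmod : PySem.Int.mod (santa_id.toList.length : Int) slice_len ≠ 0 := by
        rw [Ne, PySem.Int.mod_eq_zero_iff_dvd]; exact hdvd
      unfold is_invalid_id_for_slice_len is_invalid_id_for_slice_len_alt
      rw [if_pos hmod, if_pos hmod]
  · exact absurd hz hPre
  · exact is_invalid_spec_pos santa_id slice_len hpos

theorem is_invalid_id_for_slice_len_changed : Claim_changed_is_invalid_id_for_slice_len := by
  unfold Claim_changed_is_invalid_id_for_slice_len; decide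

theorem is_invalid_id_for_slice_len_tight : Claim_exact_is_invalid_id_for_slice_len := by
  intro santa_id slice_len _hDom _hPre hD
  rw [is_invalid_A_true_on_D santa_id slice_len hD,
    is_invalid_B_false_on_D santa_id slice_len hD]
  decide
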